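-- pv_equiv track=rewrite | github.com/Amsan5941/Python-Projects | Lab3.py | Question_8
-- ===== SOURCE A (Python) =====
-- def Question_8(int1,int2,int3,int4):
--   integers=[]
--   integers.extend((int1,int2,int3,int4))
--   for i in range (0,4):
--     if integers.count(int1)==2 and integers.count(int2)==2 and integers.count(int3)==2 and integers.count(int4)==2:
--       return "Two Pairs"
--     elif integers.count(int1)==4:
--       return "Two Pairs"
--     else:
--       return "Not Two Pairs"
-- ===== SOURCE B (Python) =====
-- def Question_8(int1, int2, int3, int4):
--     # Two pairs iff the four values can be split into two equal couples
--     # (all-four-equal is covered because every pairing then matches).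
--     two_pairs = ((int1 == int2 and int3 == int4)
--                  or (int1 == int3 and int2 == int4)
--                  or (int1 == int4 and int2 == int3))
--     return "Two Pairs" if two_pairs else "Not Two Pairs"
-- ===== Notes on version B (the rewrite author's own statement) =====
-- stated objective: simpler
-- what changed: Replaces the list build, the dead for-loop and the repeated .count scans with a direct check of the three possible pairings of the four arguments.
import Mathlib
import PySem

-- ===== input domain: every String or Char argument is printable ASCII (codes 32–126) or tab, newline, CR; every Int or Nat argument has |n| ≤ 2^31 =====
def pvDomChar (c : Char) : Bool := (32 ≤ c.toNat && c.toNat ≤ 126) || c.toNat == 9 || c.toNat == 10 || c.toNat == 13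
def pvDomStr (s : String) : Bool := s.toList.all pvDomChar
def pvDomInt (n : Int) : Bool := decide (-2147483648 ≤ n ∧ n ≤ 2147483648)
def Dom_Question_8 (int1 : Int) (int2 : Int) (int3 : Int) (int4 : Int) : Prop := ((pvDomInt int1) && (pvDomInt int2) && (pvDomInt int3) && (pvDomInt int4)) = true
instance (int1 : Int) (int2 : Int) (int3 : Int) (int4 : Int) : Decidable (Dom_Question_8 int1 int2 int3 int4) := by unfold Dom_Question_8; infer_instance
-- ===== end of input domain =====

-- B replaces the list build, the dead loop and the repeated .count scans with a
-- direct check of the three possible pairings of the four arguments (objective: simpler).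


-- ===== PORT A =====
-- The Python for-loop's body returns on its very first iteration for every input
-- (each of its three branches ends in return, and range(0,4) is non-empty), so it
-- is ported as its body executed once.
def Question_8 (int1 : Int) (int2 : Int) (int3 : Int) (int4 : Int) : String :=
  let integers : List Int := [] ++ [int1, int2, int3, int4]
  if PySem.List.count integers int1 = 2 ∧ PySem.List.count integers int2 = 2 ∧
     PySem.List.count integers int3 = 2 ∧ PySem.List.count integers int4 = 2 then
    "Two Pairs"
  else if PySem.List.count integers int1 = 4 then
    "Two Pairs"
  else
    "Not Two Pairs"

-- ===== PORT B =====
def Question_8_alt (int1 : Int) (int2 : Int) (int3 : Int) (int4 : Int) : String :=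
  let two_pairs : Bool :=
    (int1 == int2 && int3 == int4) || (int1 == int3 && int2 == int4) ||
    (int1 == int4 && int2 == int3)
  if two_pairs then "Two Pairs" else "Not Two Pairs"

-- ===== PRECONDITION & SPEC =====
def Spec_Question_8 (int1 : Int) (int2 : Int) (int3 : Int) (int4 : Int) (out : String) : Prop := out = Question_8_alt int1 int2 int3 int4
instance (int1 : Int) (int2 : Int) (int3 : Int) (int4 : Int) (out : String) : Decidable (Spec_Question_8 int1 int2 int3 int4 out) := by unfold Spec_Question_8; infer_instance

-- ===== CLAIM (what is proved, stated in full; the proofs are below) =====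
def Claim_equal_Question_8 : Prop := ∀ (int1 : Int) (int2 : Int) (int3 : Int) (int4 : Int), Dom_Question_8 int1 int2 int3 int4 → Spec_Question_8 int1 int2 int3 int4 (Question_8 int1 int2 int3 int4)

-- ===== LEMMAS AND PROOFS =====

-- A's test ("every argument occurs exactly twice, or the first occurs four times")
-- holds exactly when the four arguments split into two equal couples.
set_option maxHeartbeats 1000000 in
theorem count_char (a b c d : Int) :
    ((([a,b,c,d] : List Int).count a = 2 ∧ ([a,b,c,d] : List Int).count b = 2 ∧
      ([a,b,c,d] : List Int).count c = 2 ∧ ([a,b,c,d] : List Int).count d = 2) ∨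
      ([a,b,c,d] : List Int).count a = 4) ↔
    ((a = b ∧ c = d) ∨ (a = c ∧ b = d) ∨ (a = d ∧ b = c)) := by
  simp only [List.count_cons, List.count_nil, beq_iff_eq]
  by_cases h1 : b = a <;> by_cases h2 : c = a <;> by_cases h3 : d = a <;>
    by_cases h4 : c = b <;> by_cases h5 : d = b <;> by_cases h6 : d = c <;>
    simp_all [eq_comm]

-- ===== VERDICT (by name: the statement is the Claim_ definition above) =====
theorem Question_8_spec : Claim_equal_Question_8 := by
  intro a b c d _
  unfold Spec_Question_8 Question_8 Question_8_alt
  simp only [PySem.List.count_eq, List.nil_append]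
  by_cases H : (a = b ∧ c = d) ∨ (a = c ∧ b = d) ∨ (a = d ∧ b = c)
  · have hb : ((a == b && (c == d) || (a == c && (b == d)) || (a == d && (b == c))) : Bool) = true := by
      simp only [Bool.or_eq_true, Bool.and_eq_true, beq_iff_eq]; tauto
    rw [hb, if_pos rfl]
    rcases (count_char a b c d).mpr H with h2 | h2
    · rw [if_pos h2]
    · by_cases h1 : (([a,b,c,d] : List Int).count a = 2 ∧ ([a,b,c,d] : List Int).count b = 2 ∧
        ([a,b,c,d] : List Int).count c = 2 ∧ ([a,b,c,d] : List Int).count d = 2)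
      · rw [if_pos h1]
      · rw [if_neg h1, if_pos h2]
  · have hb : ((a == b && (c == d) || (a == c && (b == d)) || (a == d && (b == c))) : Bool) = false := by
      simp only [Bool.or_eq_false_iff, Bool.and_eq_false_iff, beq_eq_false_iff_ne, ne_eq]
      tauto
    have hn := (not_iff_not.mpr (count_char a b c d)).mpr H
    rw [not_or] at hn
    rw [if_neg hn.1, if_neg hn.2, hb, if_neg (by simp)]
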